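-- pv_equiv track=rewrite | github.com/itpplasma/NEO-2 | PythonScripts/scan_nonhdf5_tools.py | split_into_text_messages
-- ===== SOURCE A (Python) =====
-- def split_into_text_messages(lines):
--   """Takes the lines of a file, and splits it into individual messages.
--
--   This takes a list with the lines of a file, and sorts them into
--   lists of lists, where each entry of the outer represents a single
--   message, and the inner one are the lines of the message.
--   Messages are assumed to be separated by lines containing only three
--   dots '...'.
--   """
--   text_messages = []
--   text_messages.append([])
--   for l in lines:
--     if l.strip() != '...':
--       text_messages[-1].append(l.strip())
--     else:
--       text_messages.append([])
--
--   # Messages end with '...' so we added one element to much.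
--   text_messages.pop()
--
--   return text_messages
-- ===== SOURCE B (Python) =====
-- def split_into_text_messages(lines):
--   """Split the (stripped) lines into messages, one per '...' separator line."""
--   stripped = [l.strip() for l in lines]
--   messages = []
--   start = 0
--   for i, s in enumerate(stripped):
--     if s == '...':
--       messages.append(stripped[start:i])
--       start = i + 1
--   return messages
-- ===== Notes on version B (the rewrite author's own statement) =====
-- stated objective: alternative
-- what changed: B first strips all lines, then scans for separator indices and emits each message as a slice between a running start index and the separator, instead of A's mutate-the-last-group accumulator with a trailing pop.
import Mathlib
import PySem

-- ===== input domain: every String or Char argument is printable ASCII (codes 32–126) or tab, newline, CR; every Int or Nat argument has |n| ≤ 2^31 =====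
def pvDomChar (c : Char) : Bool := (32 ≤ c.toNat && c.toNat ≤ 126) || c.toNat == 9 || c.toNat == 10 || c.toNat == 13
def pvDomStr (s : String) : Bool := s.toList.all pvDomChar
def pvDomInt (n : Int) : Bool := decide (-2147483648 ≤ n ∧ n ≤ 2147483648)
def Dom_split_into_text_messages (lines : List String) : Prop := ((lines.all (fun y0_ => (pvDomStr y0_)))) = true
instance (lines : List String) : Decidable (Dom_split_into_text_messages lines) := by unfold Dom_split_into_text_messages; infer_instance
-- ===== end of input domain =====

-- B strips all lines first, then emits each message as a slice between a running
-- start index and each '...' separator index — an alternative decomposition of A's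
-- mutate-the-last-group accumulator with a trailing pop.

-- ===== PORT A =====
def split_into_text_messages (lines : List String) : List (List String) :=
  -- text_messages = [[]]; for l in lines: append strip to last group, or open a new group
  let tm := lines.foldl
    (fun tm l =>
      if PySem.Str.strip l ≠ "..." then
        tm.dropLast ++ [((tm.getLast?.getD []) ++ [PySem.Str.strip l])]   -- text_messages[-1].append(l.strip())
      else tm ++ [[]])
    [[]]
  tm.dropLast   -- text_messages.pop(): tm is never empty, pop discards the last group

-- ===== PORT B =====
def split_into_text_messages_alt (lines : List String) : List (List String) :=
  let stripped := lines.map PySem.Str.strip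
  let r := (PySem.List.enumerate stripped 0).foldl
    (fun (st : Int × List (List String)) (p : Int × String) =>
      if p.2 = "..." then
        (p.1 + 1, st.2 ++ [PySem.List.slice stripped (some st.1) (some p.1)])
      else st)
    ((0 : Int), ([] : List (List String)))
  r.2

-- ===== PRECONDITION & SPEC =====
def Spec_split_into_text_messages (lines : List String) (out : List (List String)) : Prop := out = split_into_text_messages_alt lines
instance (lines : List String) (out : List (List String)) : Decidable (Spec_split_into_text_messages lines out) := by unfold Spec_split_into_text_messages; infer_instance

-- ===== CLAIM (what is proved, stated in full; the proofs are below) =====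
def Claim_equal_split_into_text_messages : Prop := ∀ (lines : List String), Dom_split_into_text_messages lines → Spec_split_into_text_messages lines (split_into_text_messages lines)

-- ===== LEMMAS AND PROOFS =====

/-- Common characterisation: groups of already-stripped lines, given the pending group `cur`;
    one group per `"..."` separator, anything after the last separator is dropped. -/
def pvGroups (cur : List String) : List String → List (List String)
  | [] => []
  | s :: xs => if s = "..." then cur :: pvGroups [] xs else pvGroups (cur ++ [s]) xs

theorem pvA_loop (ls : List String) : ∀ (acc : List (List String)) (cur : List String),
    (ls.foldl
      (fun tm l =>
        if PySem.Str.strip l ≠ "..." then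
          tm.dropLast ++ [((tm.getLast?.getD []) ++ [PySem.Str.strip l])]
        else tm ++ [[]])
      (acc ++ [cur])).dropLast = acc ++ pvGroups cur (ls.map PySem.Str.strip) := by
  induction ls with
  | nil => intro acc cur; simp [pvGroups]
  | cons l ls ih =>
    intro acc cur
    simp only [List.foldl_cons, List.map_cons]
    by_cases h : PySem.Str.strip l = "..."
    · rw [if_neg (fun hc => hc h)]
      have e : pvGroups cur (PySem.Str.strip l :: ls.map PySem.Str.strip)
          = cur :: pvGroups [] (ls.map PySem.Str.strip) := by simp [pvGroups, h]
      rw [e, show acc ++ [cur] ++ [[]] = (acc ++ [cur]) ++ [([] : List String)] from rfl,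
        ih (acc ++ [cur]) []]
      simp
    · rw [if_pos h]
      have e : pvGroups cur (PySem.Str.strip l :: ls.map PySem.Str.strip)
          = pvGroups (cur ++ [PySem.Str.strip l]) (ls.map PySem.Str.strip) := by
        simp [pvGroups, h]
      rw [e]
      simp only [List.dropLast_concat, List.getLast?_concat, Option.getD_some]
      exact ih acc (cur ++ [PySem.Str.strip l])

theorem pvB_loop (ys : List String) (xs : List String) :
    ∀ (pre : List String) (k : Nat) (out : List (List String)),
    ys = pre ++ xs → k ≤ pre.length →
    ((PySem.List.enumerate xs (pre.length : Int)).foldl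
      (fun (st : Int × List (List String)) (p : Int × String) =>
        if p.2 = "..." then
          (p.1 + 1, st.2 ++ [PySem.List.slice ys (some st.1) (some p.1)])
        else st)
      ((k : Int), out)).2 = out ++ pvGroups (pre.drop k) xs := by
  induction xs with
  | nil => intro pre k out _ _; simp [PySem.List.enumerate_nil, pvGroups]
  | cons s xs ih =>
    intro pre k out hys hk
    rw [PySem.List.enumerate_cons]
    simp only [List.foldl_cons]
    by_cases h : s = "..."
    · rw [if_pos h]
      have hslice : PySem.List.slice ys (some (k : Int)) (some (pre.length : Int))
          = pre.drop k := by
        rw [PySem.List.slice_natCast, hys, List.drop_append_of_le_length hk,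
          List.take_append_of_le_length (by simp), List.take_of_length_le (by simp)]
      have hrec := ih (pre ++ [s]) (pre.length + 1) (out ++ [pre.drop k])
        (by simp [hys])
        (by simp only [List.length_append, List.length_cons, List.length_nil]; omega)
      have hdrop : (pre ++ [s]).drop (pre.length + 1) = [] := by simp
      simp only [List.length_append, List.length_cons, List.length_nil, Nat.zero_add,
        hdrop] at hrec
      push_cast at hrec
      have e : pvGroups (pre.drop k) (s :: xs) = pre.drop k :: pvGroups [] xs := by
        simp [pvGroups, h]
      rw [hslice, e, hrec]
      simp
    · rw [if_neg h]
      have hrec := ih (pre ++ [s]) k out (by simp [hys])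
        (by simp only [List.length_append, List.length_cons, List.length_nil]; omega)
      simp only [List.length_append, List.length_cons, List.length_nil, Nat.zero_add,
        List.drop_append_of_le_length hk] at hrec
      push_cast at hrec
      have e : pvGroups (pre.drop k) (s :: xs) = pvGroups (pre.drop k ++ [s]) xs := by
        simp [pvGroups, h]
      rw [e, hrec]

-- ===== VERDICT (by name: the statement is the Claim_ definition above) =====
theorem split_into_text_messages_spec : Claim_equal_split_into_text_messages := by
  intro lines _
  unfold Spec_split_into_text_messages split_into_text_messages split_into_text_messages_alt
  have hA := pvA_loop lines ([] : List (List String)) ([] : List String)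
  simp only [List.nil_append] at hA
  have hB := pvB_loop (lines.map PySem.Str.strip) (lines.map PySem.Str.strip)
    ([] : List String) 0 ([] : List (List String)) (by simp) (by simp)
  simp only [List.length_nil, Nat.cast_zero, List.drop_nil, List.nil_append] at hB
  rw [hA, hB]
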